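-- pv_equiv track=rewrite | github.com/kakaka6c/final-project | latex2mathjax.py | convert_latex_to_mathjax
-- ===== SOURCE A (Python) =====
-- def convert_latex_to_mathjax(string,count_slash=1):
--     result = ''
--     if count_slash == 1:
--         odd_replacement = '\\('
--         even_replacement = '\\)'
--     else:
--         odd_replacement = '\\\\('
--         even_replacement = '\\\\)'
--     dollar_count = 0
--
--     if "$" not in string:
--         # check if first character is backslash and second character is (
--         if string[0] == '\\' and string[1] == '(' and "value" in string:
--             return string
--         else:
--             return odd_replacement + string + even_replacement
--
--     for char in string:
--         if char == '$':
--             dollar_count += 1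
--             if dollar_count % 2 == 0:
--                 result += even_replacement
--             else:
--                 result += odd_replacement
--         else:
--             result += char
--     return result
-- ===== SOURCE B (Python) =====
-- def convert_latex_to_mathjax(string, count_slash=1):
--     if count_slash == 1:
--         odd_replacement = '\\('
--         even_replacement = '\\)'
--     else:
--         odd_replacement = '\\\\('
--         even_replacement = '\\\\)'
--     if '$' not in string:
--         if string.startswith('\\(') and 'value' in string:
--             return string
--         return odd_replacement + string + even_replacement
--     parts = string.split('$')
--     out = parts[0]
--     i = 1
--     while i + 1 < len(parts):
--         out += odd_replacement + parts[i] + even_replacement + parts[i + 1]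
--         i += 2
--     if i < len(parts):
--         out += odd_replacement + parts[i]
--     return out
-- ===== Notes on version B (the rewrite author's own statement) =====
-- stated objective: alternative
-- what changed: Replaces A's character-by-character scan with a dollar-parity counter by splitting on the dollar character and rebuilding the string two pieces at a time with a stride-2 loop that emits a fixed odd/even delimiter pair per step; the no-dollar branch uses startswith instead of indexing.
-- outside the precondition, e.g. on convert_latex_to_mathjax('', 1): A raises IndexError, B returns '\\(\\)'; on convert_latex_to_mathjax('\\', 1): A raises IndexError, B returns '\\(\\\\)'
import Mathlib
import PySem

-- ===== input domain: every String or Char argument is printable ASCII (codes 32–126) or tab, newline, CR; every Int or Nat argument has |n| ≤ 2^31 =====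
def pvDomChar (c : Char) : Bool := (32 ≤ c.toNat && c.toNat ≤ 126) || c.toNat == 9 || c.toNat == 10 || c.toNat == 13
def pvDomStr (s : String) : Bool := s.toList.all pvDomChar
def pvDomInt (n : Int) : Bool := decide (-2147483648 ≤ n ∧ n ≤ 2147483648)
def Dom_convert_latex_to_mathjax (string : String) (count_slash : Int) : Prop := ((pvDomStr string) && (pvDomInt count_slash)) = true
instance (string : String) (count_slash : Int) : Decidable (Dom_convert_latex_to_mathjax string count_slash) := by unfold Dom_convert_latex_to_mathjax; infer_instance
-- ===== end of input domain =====

-- B splits on the dollar character and rebuilds with a stride-2 pass emitting a fixed odd/even delimiter pair per step,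
-- instead of A's char-by-char scan with a parity counter (objective: alternative decomposition, same cost).

-- ===== PORT A =====
-- the no-'$' branch of A (string[0]/string[1] indexing; [] marks Python's IndexError, excluded by Pre_)
def pvNoDollarBranchA (s odd even : List Char) : List Char :=
  match PySem.List.pyGet? s 0 with
  | none => []      -- Python raises IndexError (empty string); excluded by Pre_
  | some c0 =>
    if c0 = '\\' then
      match PySem.List.pyGet? s 1 with
      | none => []  -- Python raises IndexError (length-1 string starting '\'); excluded by Pre_
      | some c1 =>
        if c1 = '(' ∧ PySem.Chars.isIn "value".toList s = true then s
        else odd ++ s ++ even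
    else odd ++ s ++ even

-- the body of A's for-loop
def pvStepA (odd even : List Char) (st : Int × List Char) (c : Char) : Int × List Char :=
  if c = '$' then
    let dc := st.1 + 1
    (dc, st.2 ++ (if dc % 2 = 0 then even else odd))
  else (st.1, st.2 ++ [c])

def convert_latex_to_mathjax (string : String) (count_slash : Int) : String :=
  let odd : List Char := if count_slash = 1 then "\\(".toList else "\\\\(".toList
  let even : List Char := if count_slash = 1 then "\\)".toList else "\\\\)".toList
  let cs := string.toList
  if PySem.Chars.isIn ['$'] cs = false then
    String.ofList (pvNoDollarBranchA cs odd even)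
  else
    String.ofList ((cs.foldl (pvStepA odd even) (0, [])).2)

-- ===== PORT B =====
-- the stride-2 while-loop of Source B: consumes the tail pieces two at a time,
-- the trailing 'if i < len(parts)' is the one-piece-left case
def pvPairJoin (odd even : List Char) : List (List Char) → List Char
  | [] => []
  | [p] => odd ++ p
  | p :: q :: rest => odd ++ p ++ even ++ q ++ pvPairJoin odd even rest

def convert_latex_to_mathjax_alt (string : String) (count_slash : Int) : String :=
  let odd : List Char := if count_slash = 1 then "\\(".toList else "\\\\(".toList
  let even : List Char := if count_slash = 1 then "\\)".toList else "\\\\)".toList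
  let cs := string.toList
  if PySem.Chars.isIn ['$'] cs = false then
    if PySem.Chars.startswith cs "\\(".toList = true ∧ PySem.Chars.isIn "value".toList cs = true then
      string
    else String.ofList (odd ++ cs ++ even)
  else
    let parts := cs.splitOn '$'
    String.ofList (parts.headD [] ++ pvPairJoin odd even parts.tail)

-- ===== PRECONDITION & SPEC =====
-- Pre_ excludes exactly the inputs on which A raises IndexError: dollar-free strings that are
-- empty or of length 1 starting with a backslash.
def Pre_convert_latex_to_mathjax (string : String) (count_slash : Int) : Prop :=
  '$' ∈ string.toList ∨
    (string.toList ≠ [] ∧ (string.toList.headD ' ' = '\\' → 2 ≤ string.toList.length))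
instance (string : String) (count_slash : Int) : Decidable (Pre_convert_latex_to_mathjax string count_slash) := by unfold Pre_convert_latex_to_mathjax; infer_instance
def pvWitness_convert_latex_to_mathjax : String × Int := ("a$b+c$d", 1)
def Spec_convert_latex_to_mathjax (string : String) (count_slash : Int) (out : String) : Prop := out = convert_latex_to_mathjax_alt string count_slash
instance (string : String) (count_slash : Int) (out : String) : Decidable (Spec_convert_latex_to_mathjax string count_slash out) := by unfold Spec_convert_latex_to_mathjax; infer_instance

-- ===== CLAIM (what is proved, stated in full; the proofs are below) =====
def Claim_equal_convert_latex_to_mathjax : Prop := ∀ (string : String) (count_slash : Int), Dom_convert_latex_to_mathjax string count_slash → Pre_convert_latex_to_mathjax string count_slash → Spec_convert_latex_to_mathjax string count_slash (convert_latex_to_mathjax string count_slash)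

-- ===== LEMMAS AND PROOFS =====

-- the delimiter inserted in place of the n-th '$'
def pvDelim (odd even : List Char) (n : Int) : List Char := if n % 2 = 0 then even else odd

-- what A's scan produces after d dollars already seen
def pvGlueA (odd even : List Char) : List Char → Int → List Char
  | [], _ => []
  | c :: cs, d =>
    if c = '$' then pvDelim odd even (d + 1) ++ pvGlueA odd even cs (d + 1)
    else c :: pvGlueA odd even cs d

-- delimiter-piece alternation, first delimiter index n
def pvInter (odd even : List Char) : Int → List (List Char) → List Char
  | _, [] => []
  | n, q :: qs => pvDelim odd even n ++ q ++ pvInter odd even (n + 1) qs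

theorem pvStepA_dollar (odd even : List Char) (d : Int) (acc : List Char) :
    pvStepA odd even (d, acc) '$' = (d + 1, acc ++ pvDelim odd even (d + 1)) := rfl

theorem pvStepA_ne (odd even : List Char) (d : Int) (acc : List Char) {c : Char}
    (h : c ≠ '$') : pvStepA odd even (d, acc) c = (d, acc ++ [c]) := by
  simp [pvStepA, h]

theorem pvFoldA_eq (odd even : List Char) (cs : List Char) :
    ∀ (d : Int) (acc : List Char),
      (cs.foldl (pvStepA odd even) (d, acc)).2 = acc ++ pvGlueA odd even cs d := by
  induction cs with
  | nil => simp [pvGlueA]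
  | cons c cs ih =>
    intro d acc
    rw [List.foldl_cons]
    by_cases h : c = '$'
    · subst h
      rw [pvStepA_dollar, ih]
      simp [pvGlueA]
    · rw [pvStepA_ne _ _ _ _ h, ih]
      simp [pvGlueA, h]

theorem pvSplitOnP_ne_nil {α : Type} (p : α → Bool) (l : List α) : l.splitOnP p ≠ [] := by
  induction l with
  | nil => simp [List.splitOnP_nil]
  | cons x xs ih =>
    rw [List.splitOnP_cons]
    split_ifs with h
    · simp
    · cases hx : xs.splitOnP p with
      | nil => exact absurd hx ih
      | cons a as => simp [List.modifyHead]

theorem pvGlueA_eq (odd even : List Char) (cs : List Char) :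
    ∀ (d : Int),
      pvGlueA odd even cs d
        = (cs.splitOn '$').headD [] ++ pvInter odd even (d + 1) ((cs.splitOn '$').tail) := by
  induction cs with
  | nil => intro d; simp [pvGlueA, List.splitOn, List.splitOnP_nil, pvInter]
  | cons c cs ih =>
    intro d
    by_cases h : c = '$'
    · subst h
      simp only [List.splitOn, List.splitOnP_cons, beq_self_eq_true, if_true] at *
      cases hx : List.splitOnP (fun x => x == '$') cs with
      | nil => exact absurd hx (pvSplitOnP_ne_nil _ cs)
      | cons p ps =>
        have := ih (d + 1)
        rw [hx] at this
        simp only [List.headD_cons, List.tail_cons] at this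
        simp [pvGlueA, this, pvInter]
    · have hb' : (c == '$') = false := by simp [h]
      simp only [List.splitOn, List.splitOnP_cons, hb', Bool.false_eq_true, if_false] at *
      cases hx : List.splitOnP (fun x => x == '$') cs with
      | nil => exact absurd hx (pvSplitOnP_ne_nil _ cs)
      | cons p ps =>
        have := ih d
        rw [hx] at this
        simp only [List.headD_cons, List.tail_cons] at this
        simp [pvGlueA, h, this, List.modifyHead]

theorem pvIsIn_dollar (cs : List Char) :
    PySem.Chars.isIn ['$'] cs = true ↔ '$' ∈ cs := by
  rw [PySem.Chars.isIn_iff_infix]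
  exact List.singleton_infix_iff '$' cs

-- alternating delimiters starting at an odd index = the two-at-a-time pairing
theorem pvInter_odd_eq_pairJoin (odd even : List Char) (ps : List (List Char)) :
    ∀ (n : Int), n % 2 = 1 → pvInter odd even n ps = pvPairJoin odd even ps := by
  induction ps using pvPairJoin.induct with
  | case1 => intro n _; rfl
  | case2 p =>
    intro n hn
    simp [pvInter, pvPairJoin, pvDelim, hn]
  | case3 p q rest ih =>
    intro n hn
    have h1 : (n + 1) % 2 = 0 := by omega
    have h2 : (n + 2) % 2 = 1 := by omega
    simp [pvInter, pvPairJoin, pvDelim, hn, h1, ih (n + 1 + 1) (by omega)]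

theorem pvGet0 (c : Char) (cs : List Char) : PySem.List.pyGet? (c :: cs) 0 = some c := by
  rw [show (0 : Int) = ((0 : Nat) : Int) by norm_num, PySem.List.pyGet?_natCast]; rfl

theorem pvGet1 (c0 c1 : Char) (cs : List Char) : PySem.List.pyGet? (c0 :: c1 :: cs) 1 = some c1 := by
  rw [show (1 : Int) = ((1 : Nat) : Int) by norm_num, PySem.List.pyGet?_natCast]; rfl

-- startswith '\\(' characterised on a cons-cons list and on a singleton
theorem pvSW2 (c0 c1 : Char) (r : List Char) :
    PySem.Chars.startswith (c0 :: c1 :: r) "\\(".toList = true ↔ (c0 = '\\' ∧ c1 = '(') := by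
  simp [PySem.Chars.startswith, List.isPrefixOf]
  constructor
  · rintro ⟨a, b⟩; exact ⟨a.symm, b.symm⟩
  · rintro ⟨a, b⟩; exact ⟨a.symm, b.symm⟩

theorem pvSW1 (c0 : Char) :
    PySem.Chars.startswith [c0] "\\(".toList = false := by
  simp [PySem.Chars.startswith, List.isPrefixOf]

-- the no-'$' branches agree on nonempty strings (length ≥ 2 when starting with a backslash)
theorem pvBranch_eq (odd even cs : List Char) (hnil : cs ≠ [])
    (hlen : cs.headD ' ' = '\\' → 2 ≤ cs.length) :
    pvNoDollarBranchA cs odd even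
      = if PySem.Chars.startswith cs "\\(".toList = true ∧
            PySem.Chars.isIn "value".toList cs = true then cs
        else odd ++ cs ++ even := by
  cases cs with
  | nil => exact absurd rfl hnil
  | cons c0 rest =>
    by_cases hb0 : c0 = '\\'
    · subst hb0
      have h2 : 2 ≤ (('\\' :: rest).length) := hlen (by simp)
      cases rest with
      | nil => simp at h2
      | cons c1 rest' =>
        simp only [pvNoDollarBranchA, pvGet0, pvGet1]
        rw [if_pos trivial]
        by_cases hv : c1 = '(' <;>
          by_cases hval : PySem.Chars.isIn "value".toList ('\\' :: c1 :: rest') = true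
        · rw [if_pos ⟨hv, hval⟩, if_pos ⟨(pvSW2 _ _ _).2 ⟨rfl, hv⟩, hval⟩]
        · rw [if_neg (fun hc => hval hc.2), if_neg (fun hc => hval hc.2)]
        · rw [if_neg (fun hc => hv hc.1),
            if_neg (fun hc => hv ((pvSW2 _ _ _).1 hc.1).2)]
        · rw [if_neg (fun hc => hval hc.2), if_neg (fun hc => hval hc.2)]
    · simp only [pvNoDollarBranchA, pvGet0]
      rw [if_neg hb0]
      cases rest with
      | nil =>
        rw [if_neg (fun hc => by rw [pvSW1] at hc; exact absurd hc.1 (by simp))]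
      | cons c1 rest' =>
        rw [if_neg (fun hc => hb0 ((pvSW2 _ _ _).1 hc.1).1)]

-- ===== VERDICT (by name: the statement is the Claim_ definition above) =====
theorem convert_latex_to_mathjax_spec : Claim_equal_convert_latex_to_mathjax := by
  intro string count_slash _ hpre
  unfold Spec_convert_latex_to_mathjax convert_latex_to_mathjax convert_latex_to_mathjax_alt
  by_cases h : '$' ∈ string.toList
  · have hne : PySem.Chars.isIn ['$'] string.toList = true :=
      (pvIsIn_dollar string.toList).2 h
    have hne' : ¬ (PySem.Chars.isIn ['$'] string.toList = false) := by simp [hne]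
    rw [if_neg hne', if_neg hne', pvFoldA_eq, pvGlueA_eq,
      pvInter_odd_eq_pairJoin _ _ _ (0 + 1) (by norm_num)]
    simp
  · have hne : PySem.Chars.isIn ['$'] string.toList = false := by
      rcases hb : PySem.Chars.isIn ['$'] string.toList with _ | _
      · rfl
      · exact absurd ((pvIsIn_dollar string.toList).1 hb) h
    rcases hpre with hd | ⟨hnil, hlen⟩
    · exact absurd hd h
    rw [if_pos hne, if_pos hne, pvBranch_eq _ _ _ hnil hlen]
    split_ifs <;> simp
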